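-- pv_equiv track=rewrite | github.com/rishabhjainfinal/technojam-task | task_3/Q4.py | answer
-- ===== SOURCE A (Python) =====
-- def answer(arr):
--     prime_list = []
--     for num in arr:
--         if num > 1 :
--             for i in range(2, num):
--                 if (num % i) == 0:
--                     break # break out of loop if factor exists
--             else : prime_list.append(num)
--     if len(prime_list) == len(set(prime_list)):
--         return "YES"
--     return "NO"
-- ===== SOURCE B (Python) =====
-- def _is_prime(num):
--     if num < 2:
--         return False
--     d = 2
--     while d * d <= num:
--         if num % d == 0:
--             return False
--         d += 1
--     return True
--
--
-- def answer(arr):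
--     prev = None
--     for num in sorted(arr):
--         if _is_prime(num):
--             if num == prev:
--                 return "NO"
--             prev = num
--     return "YES"
-- ===== Notes on version B (the rewrite author's own statement) =====
-- stated objective: faster
-- what changed: B bounds trial division at sqrt(num) instead of scanning all of 2..num-1, and detects duplicate primes by sorting the array and comparing each accepted prime with its predecessor, instead of collecting a list and comparing its length with its set's.
import Mathlib
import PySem

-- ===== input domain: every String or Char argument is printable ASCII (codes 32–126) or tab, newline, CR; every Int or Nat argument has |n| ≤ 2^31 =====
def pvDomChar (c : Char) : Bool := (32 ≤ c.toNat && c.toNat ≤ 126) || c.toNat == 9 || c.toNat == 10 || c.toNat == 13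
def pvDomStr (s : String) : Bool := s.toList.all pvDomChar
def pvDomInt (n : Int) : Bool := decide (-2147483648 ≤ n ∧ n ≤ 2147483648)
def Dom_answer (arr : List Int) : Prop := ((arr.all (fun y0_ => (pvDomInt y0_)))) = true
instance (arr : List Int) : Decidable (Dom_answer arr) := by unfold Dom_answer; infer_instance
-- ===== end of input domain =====

-- B replaces A's full-range trial division and list-vs-set length test by a
-- sqrt-bounded trial division and a sort-then-adjacent-predecessor scan (no set).

-- ===== PORT A =====
-- A's inner 'for i in range(2, num): if num % i == 0: break / else:' as a fuel
-- recursion over i = 2, 3, …, num-1 (exact: the range is walked in order, break at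
-- the first divisor); returns true iff the loop broke (a divisor exists).
def answerLoopA (num : Int) : Nat → Int → Bool
  | 0, _ => false
  | fuel + 1, i => if PySem.Int.mod num i == 0 then true else answerLoopA num fuel (i + 1)

def answer (arr : List Int) : String :=
  let prime_list := arr.foldl
    (fun acc num =>
      if num > 1 then
        if answerLoopA num (num - 2).toNat 2 then acc
        else acc ++ [num]
      else acc) []
  if prime_list.length == (PySem.Set.ofList prime_list).length then "YES" else "NO"

-- ===== PORT B =====
-- Source B's 'while d * d <= num' loop as a fuel recursion (fuel num.toNat is enough:
-- the loop stops once d*d > num, and d never exceeds num before that).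
def altTrial (num : Int) : Nat → Int → Bool
  | 0, _ => true
  | fuel + 1, d =>
    if d * d ≤ num then
      if PySem.Int.mod num d == 0 then false else altTrial num fuel (d + 1)
    else true

def isPrimeAlt (num : Int) : Bool :=
  if num < 2 then false else altTrial num num.toNat 2

def altGo (prev : Option Int) : List Int → String
  | [] => "YES"
  | num :: rest =>
    if isPrimeAlt num then
      if some num == prev then "NO" else altGo (some num) rest
    else altGo prev rest

def answer_alt (arr : List Int) : String :=
  altGo none (PySem.List.sorted arr (fun x => x) false)

-- ===== PRECONDITION & SPEC =====
def Spec_answer (arr : List Int) (out : String) : Prop := out = answer_alt arr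
instance (arr : List Int) (out : String) : Decidable (Spec_answer arr out) := by unfold Spec_answer; infer_instance

-- ===== CLAIM (what is proved, stated in full; the proofs are below) =====
def Claim_equal_answer : Prop := ∀ (arr : List Int), Dom_answer arr → Spec_answer arr (answer arr)

-- ===== LEMMAS AND PROOFS =====

-- "num is prime" as A's loop decides it
def primeFull (num : Int) : Bool :=
  decide (num > 1) && !answerLoopA num (num - 2).toNat 2

lemma loopA_char (num : Int) (fuel : Nat) : ∀ i : Int,
    answerLoopA num fuel i = decide (∃ k : Nat, k < fuel ∧ PySem.Int.mod num (i + k) = 0) := by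
  induction fuel with
  | zero => intro i; simp [answerLoopA]
  | succ fuel ih =>
    intro i
    simp only [answerLoopA]
    by_cases h : PySem.Int.mod num i = 0
    · rw [if_pos (by simpa using h), eq_comm, decide_eq_true_eq]
      exact ⟨0, by omega, by simpa using h⟩
    · rw [if_neg (by simpa using h), ih]
      congr 1
      apply propext
      constructor
      · rintro ⟨k, hk, hm⟩
        refine ⟨k + 1, by omega, ?_⟩
        have hc : i + ((k + 1 : Nat) : Int) = i + 1 + k := by push_cast; ring
        rw [hc]; exact hm
      · rintro ⟨k, hk, hm⟩
        match k, hk, hm with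
        | 0, _, hm => exact absurd (by simpa using hm) h
        | k + 1, hk, hm =>
          refine ⟨k, by omega, ?_⟩
          have hc : i + ((k + 1 : Nat) : Int) = i + 1 + k := by push_cast; ring
          rw [hc] at hm; exact hm

lemma primeFull_iff (num : Int) :
    primeFull num = true ↔ 1 < num ∧ ∀ i : Int, 2 ≤ i → i < num → ¬ i ∣ num := by
  unfold primeFull
  rw [loopA_char]
  simp only [Bool.and_eq_true, decide_eq_true_iff, Bool.not_eq_true', decide_eq_false_iff_not]
  constructor
  · rintro ⟨h1, h2⟩
    refine ⟨h1, fun i h2i hin hdvd => h2 ?_⟩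
    refine ⟨(i - 2).toNat, by omega, ?_⟩
    have : (2 : Int) + (i - 2).toNat = i := by omega
    rw [this, PySem.Int.mod_eq_zero_iff_dvd]; exact hdvd
  · rintro ⟨h1, h2⟩
    refine ⟨h1, ?_⟩
    rintro ⟨k, hk, hm⟩
    rw [PySem.Int.mod_eq_zero_iff_dvd] at hm
    exact h2 (2 + k) (by omega) (by omega) hm

lemma altTrial_char (num : Int) (fuel : Nat) : ∀ d : Int, 0 < d →
    altTrial num fuel d
      = decide (∀ k : Nat, k < fuel → (d + k) * (d + k) ≤ num → PySem.Int.mod num (d + k) ≠ 0) := by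
  induction fuel with
  | zero => intro d _; simp [altTrial]
  | succ fuel ih =>
    intro d hd
    simp only [altTrial]
    by_cases hle : d * d ≤ num
    · rw [if_pos hle]
      by_cases hm : PySem.Int.mod num d = 0
      · rw [if_pos (by simpa using hm), eq_comm, decide_eq_false_iff_not]
        intro h
        exact h 0 (by omega) (by simpa using hle) (by simpa using hm)
      · rw [if_neg (by simpa using hm), ih (d + 1) (by omega)]
        congr 1
        apply propext
        constructor
        · intro h k hk hsq
          match k, hk, hsq with
          | 0, _, _ => simpa using hm
          | k + 1, hk, hsq =>
            have hc : d + ((k + 1 : Nat) : Int) = d + 1 + k := by push_cast; ring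
            rw [hc] at hsq ⊢
            exact h k (by omega) hsq
        · intro h k hk hsq
          have hc : d + ((k + 1 : Nat) : Int) = d + 1 + k := by push_cast; ring
          rw [← hc] at hsq ⊢
          exact h (k + 1) (by omega) hsq
    · rw [if_neg hle, eq_comm, decide_eq_true_eq]
      intro k _ hsq
      exfalso
      have : d * d ≤ (d + ↑k) * (d + ↑k) := by nlinarith [Int.natCast_nonneg k]
      omega

lemma isPrimeAlt_iff (num : Int) :
    isPrimeAlt num = true ↔ 1 < num ∧ ∀ d : Int, 2 ≤ d → d * d ≤ num → ¬ d ∣ num := by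
  unfold isPrimeAlt
  by_cases h1 : num < 2
  · rw [if_pos h1]; simp; omega
  · rw [if_neg h1, altTrial_char num num.toNat 2 (by omega)]
    simp only [decide_eq_true_iff]
    constructor
    · intro h
      refine ⟨by omega, fun d h2d hsq hdvd => ?_⟩
      have hdn : d ≤ num := by nlinarith
      have heq : (2 : Int) + ((d - 2).toNat : Int) = d := by omega
      have hstep := h (d - 2).toNat (by omega) (by rw [heq]; exact hsq)
      rw [heq] at hstep
      exact hstep ((PySem.Int.mod_eq_zero_iff_dvd num d).mpr hdvd)
    · rintro ⟨_, h⟩ k _ hsq hm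
      rw [PySem.Int.mod_eq_zero_iff_dvd] at hm
      exact h (2 + k) (by omega) hsq hm

-- the two primality loops agree: a composite num > 1 has a divisor d with d*d ≤ num
lemma primeFull_eq_isPrimeAlt (num : Int) : primeFull num = isPrimeAlt num := by
  by_cases hp : primeFull num = true
  · have h := (primeFull_iff num).mp hp
    rw [hp, eq_comm]
    rw [isPrimeAlt_iff]
    refine ⟨h.1, fun d h2d hsq hdvd => ?_⟩
    have hdlt : d < num := by nlinarith
    exact h.2 d h2d hdlt hdvd
  · rw [Bool.not_eq_true] at hp
    rw [hp, eq_comm, Bool.eq_false_iff, Ne, isPrimeAlt_iff]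
    rintro ⟨h1, h2⟩
    rw [Bool.eq_false_iff, Ne, primeFull_iff] at hp
    apply hp
    refine ⟨h1, fun i h2i hin hdvd => ?_⟩
    obtain ⟨j, hj⟩ := hdvd
    have hipos : (0 : Int) < i := by omega
    have hjpos : (0 : Int) < j := by nlinarith
    have hj2 : (2 : Int) ≤ j := by
      by_contra hlt
      push_neg at hlt
      have hj1 : j = 1 := by omega
      rw [hj1, mul_one] at hj
      omega
    by_cases hii : i * i ≤ num
    · exact h2 i h2i hii ⟨j, hj⟩
    · have hjlt : j < i := by nlinarith
      have hjj : j * j ≤ num := by nlinarith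
      exact h2 j hj2 hjj ⟨i, by rw [hj]; ring⟩

-- A's fold collects exactly the primeFull elements, in order
lemma foldA_eq_filter (arr : List Int) (acc : List Int) :
    arr.foldl
      (fun acc num =>
        if num > 1 then
          if answerLoopA num (num - 2).toNat 2 then acc
          else acc ++ [num]
        else acc) acc = acc ++ arr.filter primeFull := by
  induction arr generalizing acc with
  | nil => simp
  | cons num rest ih =>
    simp only [List.foldl_cons, List.filter_cons]
    by_cases h : num > 1
    · rw [if_pos h]
      by_cases hl : answerLoopA num (num - 2).toNat 2
      · rw [if_pos hl, ih, if_neg (by simp [primeFull, hl])]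
      · rw [if_neg hl, ih, if_pos (by simp [primeFull, h, hl])]
        simp [List.append_assoc]
    · rw [if_neg h, ih, if_neg (by simp [primeFull, h])]

lemma ofList_sublist (l : List Int) (s : PySem.Set Int) :
    ∃ t, List.foldl PySem.Set.add s l = s ++ t ∧ t.Sublist l := by
  induction l generalizing s with
  | nil => exact ⟨[], by simp⟩
  | cons a l ih =>
    simp only [List.foldl_cons]
    by_cases h : PySem.Set.contains s a
    · have hadd : PySem.Set.add s a = s := by
        simp [PySem.Set.add, List.mem_of_elem_eq_true h]
      rw [hadd]
      obtain ⟨t, ht, hs⟩ := ih s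
      exact ⟨t, ht, hs.trans (List.sublist_cons_self a l)⟩
    · have hadd : PySem.Set.add s a = s ++ [a] := by
        have hna : a ∉ s := fun hm => h (List.elem_eq_true_of_mem hm)
        simp [PySem.Set.add, hna]
      rw [hadd]
      obtain ⟨t, ht, hs⟩ := ih (s ++ [a])
      exact ⟨a :: t, by simpa [List.append_assoc] using ht, hs.cons_cons a⟩

lemma length_eq_iff_nodup (l : List Int) :
    (l.length == (PySem.Set.ofList l).length) = decide l.Nodup := by
  by_cases h : l.Nodup
  · simp [h, PySem.Set.ofList_eq_self_of_nodup l h]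
  · simp only [h, decide_false, beq_eq_false_iff_ne, ne_eq]
    intro hlen
    obtain ⟨t, ht, hs⟩ := ofList_sublist l []
    have hofl : PySem.Set.ofList l = t := by simpa using ht
    have heq : t = l := hs.eq_of_length (by rw [← hofl, ← hlen])
    exact h (by simpa [heq, hofl] using PySem.Set.nodup_ofList l)

theorem answer_eq_canon (arr : List Int) :
    answer arr = if (arr.filter primeFull).Nodup then "YES" else "NO" := by
  unfold answer
  rw [foldA_eq_filter arr []]
  simp only [List.nil_append]
  have hb := length_eq_iff_nodup (arr.filter primeFull)
  by_cases h : (arr.filter primeFull).Nodup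
  · simp only [h, decide_true] at hb
    simp [hb, h]
  · simp only [h, decide_false] at hb
    simp [hb, h]

-- B's scan restricted to the primes it accepts
def altScan (prev : Option Int) : List Int → String
  | [] => "YES"
  | num :: rest => if some num == prev then "NO" else altScan (some num) rest

lemma altGo_eq_altScan_filter (l : List Int) : ∀ prev : Option Int,
    altGo prev l = altScan prev (l.filter isPrimeAlt) := by
  induction l with
  | nil => intro prev; rfl
  | cons num rest ih =>
    intro prev
    simp only [altGo, List.filter_cons]
    by_cases hp : isPrimeAlt num
    · rw [if_pos hp, if_pos hp]
      simp only [altScan]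
      by_cases hc : (some num == prev)
      · rw [if_pos hc, if_pos hc]
      · rw [if_neg hc, if_neg hc, ih]
    · rw [if_neg hp, if_neg hp, ih]

-- prev.toList ++ l is the list the adjacent comparisons of altScan walk
def adjDistinct : List Int → Bool
  | [] => true
  | [_] => true
  | a :: b :: t => (a != b) && adjDistinct (b :: t)

lemma altScan_eq_adjDistinct (l : List Int) : ∀ prev : Option Int,
    altScan prev l = if adjDistinct (prev.toList ++ l) then "YES" else "NO" := by
  induction l with
  | nil => intro prev; cases prev <;> rfl
  | cons num rest ih =>
    intro prev
    have ih' : altScan (some num) rest = if adjDistinct (num :: rest) then "YES" else "NO" :=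
      ih (some num)
    cases prev with
    | none =>
      have h1 : altScan none (num :: rest) = altScan (some num) rest := rfl
      rw [h1, ih']
      rfl
    | some p =>
      by_cases hc : num = p
      · subst hc
        have h1 : altScan (some num) (num :: rest) = "NO" := by
          show (if (some num == some num) = true then "NO" else _) = "NO"
          simp
        rw [h1]
        have hcc : adjDistinct ((some num).toList ++ num :: rest) = false := by
          show ((num != num) && adjDistinct (num :: rest)) = false
          simp
        rw [hcc]
        rfl
      · have hne : (some num == some p) = false := by simpa using hc
        have h1 : altScan (some p) (num :: rest) = altScan (some num) rest := by
          show (if (some num == some p) = true then "NO" else altScan (some num) rest) = _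
          rw [hne]
          simp
        have hpn : (p != num) = true := by
          simp only [bne_iff_ne, ne_eq]
          exact fun h => hc h.symm
        have hcc : adjDistinct ((some p).toList ++ num :: rest) = adjDistinct (num :: rest) := by
          show ((p != num) && adjDistinct (num :: rest)) = _
          rw [hpn, Bool.true_and]
        rw [h1, ih', hcc]

lemma adjDistinct_eq_nodup (l : List Int) (hs : l.Pairwise (· ≤ ·)) :
    adjDistinct l = decide l.Nodup := by
  induction l with
  | nil => simp [adjDistinct]
  | cons a t ih =>
    cases t with
    | nil => simp [adjDistinct]
    | cons b t2 =>
      have hs' : (b :: t2).Pairwise (· ≤ ·) := hs.tail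
      have hab : a ≤ b := (List.pairwise_cons.mp hs).1 b List.mem_cons_self
      have hat : ∀ x ∈ b :: t2, a ≤ x := (List.pairwise_cons.mp hs).1
      have hbt : ∀ x ∈ t2, b ≤ x := (List.pairwise_cons.mp hs').1
      rw [show adjDistinct (a :: b :: t2) = ((a != b) && adjDistinct (b :: t2)) from rfl,
        ih hs']
      by_cases hab' : a = b
      · subst hab'
        simp [List.nodup_cons]
      · have hnm : a ∉ b :: t2 := by
          intro hmem
          rcases List.mem_cons.mp hmem with h | h
          · exact hab' h
          · have h1 : a ≤ b := hab
            have h2 : b ≤ a := hbt a h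
            exact hab' (le_antisymm h1 h2)
        by_cases hnd : (b :: t2).Nodup
        · simp [hab', hnd, List.nodup_cons, hnm]
        · simp [hab', hnd, List.nodup_cons]

theorem answer_alt_eq_canon (arr : List Int) :
    answer_alt arr = if (arr.filter primeFull).Nodup then "YES" else "NO" := by
  unfold answer_alt
  rw [altGo_eq_altScan_filter, altScan_eq_adjDistinct]
  have hfilter_eq : (fun num => isPrimeAlt num) = primeFull := by
    funext num; rw [primeFull_eq_isPrimeAlt]
  have hpair : ((PySem.List.sorted arr (fun x => x) false).filter isPrimeAlt).Pairwise (· ≤ ·) := by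
    have := PySem.List.sorted_pairwise (xs := arr) (key := fun x => x)
    exact this.filter _
  rw [show ((none : Option Int).toList ++ (PySem.List.sorted arr (fun x => x) false).filter isPrimeAlt)
        = (PySem.List.sorted arr (fun x => x) false).filter isPrimeAlt from by simp,
    adjDistinct_eq_nodup _ hpair]
  have hperm : ((PySem.List.sorted arr (fun x => x) false).filter isPrimeAlt).Perm
      (arr.filter primeFull) := by
    have hp : (PySem.List.sorted arr (fun x => x) false).Perm arr :=
      PySem.List.sorted_perm arr (fun x => x) false
    have := hp.filter isPrimeAlt
    simpa [hfilter_eq] using this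
  have hiff := hperm.nodup_iff
  by_cases h : (arr.filter primeFull).Nodup <;> simp [h, hiff]

-- ===== VERDICT (by name: the statement is the Claim_ definition above) =====
theorem answer_spec : Claim_equal_answer := by
  intro arr _
  unfold Spec_answer
  rw [answer_eq_canon, answer_alt_eq_canon]
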